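-- pv_equiv track=rewrite | github.com/jy9922/AlgorithmStudy | Programmers/프린터.py | solution
-- ===== SOURCE A (Python) =====
-- from collections import deque
--
-- def solution(priorities, location):
--     answer = 0
--     q = deque()
--
--     # 원소의 인덱스와 값 묶어서 큐에 삽입
--     for idx, v in enumerate(priorities):
--         q.append((idx, v))
--
--     # 큐가 빌때까지 반복문
--     while q:
--         a = q.popleft()
--         answer += 1
--
--         # 큐 중에 큰 원소가 존재한다면 뒤에 추가
--         for j in q:
--             if a[1] < j[1]:
--                 q.append(a)
--                 answer -= 1
--                 break
--         else:
--             # 만약 찾고자하는 location이 인덱스 번호와 같다면 while문 탈출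
--             if a[0] == location:
--                 break
--
--     return answer
-- ===== SOURCE B (Python) =====
-- from bisect import bisect_left
--
-- def solution(priorities, location):
--     # Group document indices by priority, then emit priority levels in
--     # descending order, each level in circular index order starting where
--     # the previous level finished; count until `location` is emitted.
--     n = len(priorities)
--     groups = {}
--     for i, p in enumerate(priorities):
--         groups[p] = groups.get(p, []) + [i]
--     count = 0
--     cur = 0
--     for v in sorted(groups, reverse=True):
--         idxs = groups[v]                  # ascending indices of priority v
--         k = bisect_left(idxs, cur)
--         seq = idxs[k:] + idxs[:k]         # circular order starting at cur
--         for i in seq: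
--             count += 1
--             if i == location:
--                 return count
--         cur = (seq[-1] + 1) % n           # seq is nonempty: v is a key
--     return count
-- ===== Notes on version B (the rewrite author's own statement) =====
-- stated objective: faster
-- what changed: Instead of simulating the deque (repeatedly rotating lower-priority documents to the back), B groups document indices by priority once, sorts the distinct priorities, and emits each priority level in circular index order starting where the previous level finished, counting until the requested location is emitted.
import Mathlib
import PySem

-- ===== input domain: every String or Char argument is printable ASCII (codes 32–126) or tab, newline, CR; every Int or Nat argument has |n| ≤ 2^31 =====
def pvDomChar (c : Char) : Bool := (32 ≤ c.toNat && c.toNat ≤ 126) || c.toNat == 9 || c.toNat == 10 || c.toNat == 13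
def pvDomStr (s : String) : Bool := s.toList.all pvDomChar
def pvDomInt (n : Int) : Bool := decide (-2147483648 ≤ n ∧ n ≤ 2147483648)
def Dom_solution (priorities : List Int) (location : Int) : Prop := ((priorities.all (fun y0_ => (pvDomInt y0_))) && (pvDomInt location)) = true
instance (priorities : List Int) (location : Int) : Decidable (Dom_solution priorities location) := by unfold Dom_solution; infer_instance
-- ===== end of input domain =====

-- B replaces A's O(n^2) deque simulation by grouping indices per priority and
-- emitting the priority levels in descending order, each level in circular
-- index order starting where the previous level finished (O(n log n)).

-- ===== PORT A =====
-- `isMax q x`: no element of q has a strictly larger value.  Used only for the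
-- termination measure of A's while-loop (a rotation moves the first maximal
-- element one step closer to the front).
def isMax (q : List (Int × Int)) (x : Int × Int) : Bool :=
  q.all (fun y => decide (y.2 ≤ x.2))

def distToMax (q : List (Int × Int)) : Nat := q.findIdx (isMax q)

lemma isMax_rotate (a : Int × Int) (rest : List (Int × Int)) :
    isMax (rest ++ [a]) = isMax (a :: rest) := by
  funext x
  simp [isMax, List.all_append, Bool.and_comm]

lemma exists_isMax {q : List (Int × Int)} (hq : q ≠ []) :
    ∃ m ∈ q, isMax q m = true := by
  cases hm : PySem.List.max? q (fun x => x.2) with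
  | none => exact absurd ((PySem.List.max?_eq_none_iff q _).mp hm) hq
  | some m =>
    refine ⟨m, PySem.List.max?_mem hm, ?_⟩
    simp only [isMax, List.all_eq_true, decide_eq_true_eq]
    exact fun y hy => PySem.List.max?_isMax hm y hy

lemma dist_rotate {a : Int × Int} {rest : List (Int × Int)}
    (h : isMax (a :: rest) a = false) :
    distToMax (rest ++ [a]) + 1 = distToMax (a :: rest) := by
  obtain ⟨m, hmem, hmax⟩ := exists_isMax (q := a :: rest) (by simp)
  have hmr : m ∈ rest := by
    rcases List.mem_cons.mp hmem with rfl | h'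
    · rw [hmax] at h; exact absurd h (by simp)
    · exact h'
  have hlt : rest.findIdx (isMax (a :: rest)) < rest.length :=
    List.findIdx_lt_length.mpr ⟨m, hmr, hmax⟩
  unfold distToMax
  rw [isMax_rotate, List.findIdx_append, if_pos hlt, List.findIdx_cons, h]
  simp

-- A's while-loop: pop the front; if some remaining element is strictly larger,
-- requeue the popped element at the back (answer += 1 then answer -= 1),
-- otherwise it is printed; stop when the printed document is `location`.
def aloop (q : List (Int × Int)) (answer : Int) (location : Int) : Int :=
  match q with
  | [] => answer
  | a :: rest =>
    if rest.any (fun j => decide (a.2 < j.2)) then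
      aloop (rest ++ [a]) (answer + 1 - 1) location
    else if a.1 = location then answer + 1
    else aloop rest (answer + 1) location
termination_by (q.length, distToMax q)
decreasing_by
  · rename_i h
    simp only [List.any_eq_true, decide_eq_true_eq] at h
    obtain ⟨j, hj, hlt⟩ := h
    have hfalse : isMax (a :: rest) a = false := by
      rw [Bool.eq_false_iff]
      intro hall
      simp only [isMax, List.all_eq_true, decide_eq_true_eq] at hall
      have := hall j (by simp [hj])
      omega
    have hd := dist_rotate hfalse
    have hlen : (rest ++ [a]).length = rest.length + 1 := by simp
    simp only [List.length_cons]
    apply Prod.Lex.right'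
    · omega
    · omega
  · apply Prod.Lex.left
    simp only [List.length_cons]
    omega

def solution (priorities : List Int) (location : Int) : Int :=
  aloop (PySem.List.enumerate priorities) 0 location

-- ===== PORT B =====
-- inner `for i in seq:` loop of Source B: .inl = early `return count`,
-- .inr = count after the loop fell through.
def bEmit (seq : List Int) (count location : Int) : Int ⊕ Int :=
  match seq with
  | [] => Sum.inr count
  | i :: rest =>
    if i = location then Sum.inl (count + 1)
    else bEmit rest (count + 1) location

-- outer `for v in sorted(groups, reverse=True):` loop of Source B.
def bLevels (groups : PySem.Dict Int (List Int)) (vs : List Int)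
    (count cur location n : Int) : Int :=
  match vs with
  | [] => count
  | v :: rest =>
    let idxs := groups.getD v []
    let k := PySem.List.bisectLeft idxs cur
    let seq := idxs.drop k ++ idxs.take k
    match bEmit seq count location with
    | Sum.inl r => r
    -- seq is nonempty here (v is a key), so Python's seq[-1] is total and
    -- equals getLastD seq 0.
    | Sum.inr count' =>
        bLevels groups rest count' (PySem.Int.mod (seq.getLastD 0 + 1) n) location n

def solution_alt (priorities : List Int) (location : Int) : Int :=
  let n : Int := priorities.length
  let groups : PySem.Dict Int (List Int) :=
    (PySem.List.enumerate priorities).foldl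
      (fun d q => d.modify q.2 [] (fun t => t ++ [q.1])) PySem.Dict.empty
  bLevels groups (PySem.List.sorted groups.keys (fun v => v) true) 0 0 location n

-- ===== PRECONDITION & SPEC =====
def Spec_solution (priorities : List Int) (location : Int) (out : Int) : Prop := out = solution_alt priorities location
instance (priorities : List Int) (location : Int) (out : Int) : Decidable (Spec_solution priorities location out) := by unfold Spec_solution; infer_instance

-- ===== CLAIM (what is proved, stated in full; the proofs are below) =====
def Claim_equal_solution : Prop := ∀ (priorities : List Int) (location : Int), Dom_solution priorities location → Spec_solution priorities location (solution priorities location)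

-- ===== LEMMAS AND PROOFS =====

lemma dist_lt_length {q : List (Int × Int)} (hq : q ≠ []) : distToMax q < q.length := by
  obtain ⟨m, hmem, hmax⟩ := exists_isMax hq
  exact List.findIdx_lt_length.mpr ⟨m, hmem, hmax⟩

-- value of document i (used only on valid indices)
def gval (pr : List Int) (i : Int) : Int := PySem.List.pyGetD pr i 0

-- the circular order of 0..n-1 starting at f
def rotFrom (f n : Int) : List Int := PySem.List.pyRange f n ++ PySem.List.pyRange 0 f

-- jump form of A's loop: rotate directly to the first maximal element,
-- print it, repeat.
def Fq (q : List (Int × Int)) (c loc : Int) : Int :=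
  if hq : q = [] then c
  else
    let j := q.findIdx (isMax q)
    if (q[j]'(dist_lt_length hq)).1 = loc then c + 1
    else Fq (q.drop (j+1) ++ q.take j) (c+1) loc
termination_by q.length
decreasing_by
  have := dist_lt_length hq
  unfold distToMax at this
  simp only [List.length_append, List.length_drop, List.length_take]
  omega

lemma gfind_lt (pr : List Int) {l : List Int} (hl : l ≠ []) :
    l.findIdx (fun i => l.all (fun y => decide (gval pr y ≤ gval pr i))) < l.length := by
  cases hm : PySem.List.max? l (gval pr) with
  | none => exact absurd ((PySem.List.max?_eq_none_iff l _).mp hm) hl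
  | some m =>
    refine List.findIdx_lt_length.mpr ⟨m, PySem.List.max?_mem hm, ?_⟩
    simp only [List.all_eq_true, decide_eq_true_eq]
    exact fun y hy => PySem.List.max?_isMax hm y hy

-- the same jump loop, on the list of indices (values looked up via gval)
def G (pr : List Int) (l : List Int) (c loc : Int) : Int :=
  if hl : l = [] then c
  else
    let j := l.findIdx (fun i => l.all (fun y => decide (gval pr y ≤ gval pr i)))
    if (l[j]'(gfind_lt pr hl)) = loc then c + 1
    else G pr (l.drop (j+1) ++ l.take j) (c+1) loc
termination_by l.length
decreasing_by
  have := gfind_lt pr hl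
  simp only [List.length_append, List.length_drop, List.length_take]
  omega

-- A's loop rotates k times without printing while the first maximum is ≥ k away
lemma aloop_rot (loc : Int) : ∀ (k : Nat) (q : List (Int × Int)) (ans : Int),
    k ≤ distToMax q → aloop q ans loc = aloop (q.drop k ++ q.take k) ans loc := by
  intro k
  induction k with
  | zero => intro q ans _; simp
  | succ k ih =>
    intro q ans hk
    match q with
    | [] => simp [distToMax] at hk
    | a :: rest =>
      have hfa : isMax (a :: rest) a = false := by
        rw [Bool.eq_false_iff]
        intro htrue
        have : distToMax (a :: rest) = 0 := by
          unfold distToMax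
          rw [List.findIdx_cons, htrue]
          rfl
        omega
      have hany : rest.any (fun j => decide (a.2 < j.2)) = true := by
        unfold isMax at hfa
        obtain ⟨y, hy, hlt⟩ := List.all_eq_false.mp hfa
        simp only [decide_eq_true_eq] at hlt
        rcases List.mem_cons.mp hy with rfl | hyr
        · omega
        · exact List.any_eq_true.mpr ⟨y, hyr, by simp; omega⟩
      have hd := dist_rotate hfa
      have hk' : k ≤ distToMax (rest ++ [a]) := by omega
      have hlen : k ≤ rest.length := by
        have h1 : distToMax (a :: rest) ≤ (a :: rest).length := List.findIdx_le_length
        simp only [List.length_cons] at h1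
        omega
      rw [aloop]
      rw [if_pos hany]
      have hans : ans + 1 - 1 = ans := by omega
      rw [hans, ih (rest ++ [a]) ans hk']
      congr 1
      rw [List.drop_append_of_le_length hlen, List.take_append_of_le_length hlen]
      simp [List.append_assoc]

lemma aloop_eq_Fq (loc : Int) : ∀ (N : Nat) (q : List (Int × Int)) (ans : Int),
    q.length ≤ N → aloop q ans loc = Fq q ans loc := by
  intro N
  induction N with
  | zero =>
    intro q ans hlen
    have hq : q = [] := List.eq_nil_of_length_eq_zero (by omega)
    subst hq
    rw [Fq]
    simp [aloop]
  | succ N ih =>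
    intro q ans hlen
    by_cases hq : q = []
    · subst hq
      rw [Fq]
      simp [aloop]
    · have hjl : q.findIdx (isMax q) < q.length := dist_lt_length hq
      have hmax : isMax q (q[q.findIdx (isMax q)]'hjl) = true := List.findIdx_getElem
      rw [Fq, dif_neg hq]
      rw [aloop_rot loc (q.findIdx (isMax q)) q ans (le_refl _),
          List.drop_eq_getElem_cons hjl, List.cons_append]
      have hfront : (q.drop (q.findIdx (isMax q) + 1) ++ q.take (q.findIdx (isMax q))).any
          (fun y => decide ((q[q.findIdx (isMax q)]'hjl).2 < y.2)) = false := by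
        rw [Bool.eq_false_iff]
        intro hany
        obtain ⟨y, hy, hlt⟩ := List.any_eq_true.mp hany
        have hyq : y ∈ q := by
          rcases List.mem_append.mp hy with h' | h'
          · exact List.mem_of_mem_drop h'
          · exact List.mem_of_mem_take h'
        simp only [isMax, List.all_eq_true, decide_eq_true_eq] at hmax
        have := hmax y hyq
        simp only [decide_eq_true_eq] at hlt
        omega
      rw [aloop, if_neg (by rw [hfront]; simp)]
      simp only []
      by_cases hloc : (q[q.findIdx (isMax q)]'hjl).1 = loc
      · rw [if_pos hloc]
        split_ifs with h
        · rfl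
        · exact absurd hloc h
      · rw [if_neg hloc]
        split_ifs with h
        · exact absurd h hloc
        · apply ih
          simp only [List.length_append, List.length_drop, List.length_take]
          omega

lemma Fq_map (pr : List Int) (loc : Int) : ∀ (N : Nat) (l : List Int) (c : Int),
    l.length ≤ N → Fq (l.map (fun i => (i, gval pr i))) c loc = G pr l c loc := by
  intro N
  induction N with
  | zero =>
    intro l c hlen
    have hl : l = [] := List.eq_nil_of_length_eq_zero (by omega)
    subst hl
    rw [Fq, G]
    simp
  | succ N ih =>
    intro l c hlen
    by_cases hl : l = []
    · subst hl
      rw [Fq, G]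
      simp
    · have hml : l.map (fun i => (i, gval pr i)) ≠ [] := by simpa using hl
      have hpred : (isMax (l.map (fun i => (i, gval pr i)))) ∘ (fun i => (i, gval pr i))
          = (fun i => l.all (fun y => decide (gval pr y ≤ gval pr i))) := by
        funext x
        simp [isMax, List.all_map, Function.comp_def]
      have hidx : (l.map (fun i => (i, gval pr i))).findIdx
            (isMax (l.map (fun i => (i, gval pr i))))
          = l.findIdx (fun i => l.all (fun y => decide (gval pr y ≤ gval pr i))) := by
        rw [List.findIdx_map, hpred]
      rw [Fq, dif_neg hml, G, dif_neg hl]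
      simp only []
      simp only [hidx]
      have hjl : l.findIdx (fun i => l.all (fun y => decide (gval pr y ≤ gval pr i))) < l.length :=
        gfind_lt pr hl
      have hget : ((l.map (fun i => (i, gval pr i)))[l.findIdx
            (fun i => l.all (fun y => decide (gval pr y ≤ gval pr i)))]'(by
              rw [List.length_map]; exact hjl))
          = ((l[l.findIdx (fun i => l.all (fun y => decide (gval pr y ≤ gval pr i)))]'hjl),
             gval pr (l[l.findIdx (fun i => l.all (fun y => decide (gval pr y ≤ gval pr i)))]'hjl)) := by
        rw [List.getElem_map]
      simp only [hget]
      split_ifs with h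
      · rfl
      · rw [← List.map_drop, ← List.map_take, ← List.map_append]
        apply ih
        simp only [List.length_append, List.length_drop, List.length_take]
        omega

lemma getLastD_mem_of_ne_nil {l : List Int} (d : Int) (h : l ≠ []) : l.getLastD d ∈ l := by
  induction l generalizing d with
  | nil => exact absurd rfl h
  | cons a t ih =>
    rw [List.getLastD_cons]
    cases t with
    | nil => simp
    | cons b t' => exact List.mem_cons_of_mem a (ih a (by simp))

lemma nodup_rotFrom {f n : Int} (_h0 : 0 ≤ f) : (rotFrom f n).Nodup := by
  unfold rotFrom
  rw [List.nodup_append]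
  refine ⟨PySem.List.nodup_pyRange_one f n, PySem.List.nodup_pyRange_one 0 f, ?_⟩
  intro x hx y hy
  rw [PySem.List.mem_pyRange_one] at hx hy
  omega

lemma mem_rotFrom {f n x : Int} (h0 : 0 ≤ f) (hfn : f ≤ n) :
    x ∈ rotFrom f n ↔ 0 ≤ x ∧ x < n := by
  unfold rotFrom
  rw [List.mem_append, PySem.List.mem_pyRange_one, PySem.List.mem_pyRange_one]
  omega

lemma split_unique : ∀ {U U' V V' : List Int} {i : Int},
    (U ++ i :: V).Nodup → U ++ i :: V = U' ++ i :: V' → U = U' ∧ V = V' := by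
  intro U
  induction U with
  | nil =>
    intro U' V V' i hnd heq
    cases U' with
    | nil => simpa using heq
    | cons u U'' =>
      exfalso
      simp only [List.nil_append, List.cons_append, List.cons.injEq] at heq
      obtain ⟨rfl, htail⟩ := heq
      simp only [List.nil_append, List.nodup_cons] at hnd
      apply hnd.1
      rw [htail]
      exact List.mem_append_right U'' (List.mem_cons_self ..)
  | cons u U ih =>
    intro U' V V' i hnd heq
    cases U' with
    | nil =>
      exfalso
      simp only [List.cons_append, List.nil_append, List.cons.injEq] at heq
      obtain ⟨rfl, htail⟩ := heq
      simp only [List.cons_append, List.nodup_cons] at hnd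
      exact hnd.1 (List.mem_append_right U (List.mem_cons_self ..))
    | cons u' U'' =>
      simp only [List.cons_append, List.cons.injEq] at heq
      obtain ⟨rfl, htail⟩ := heq
      simp only [List.cons_append, List.nodup_cons] at hnd
      obtain ⟨hU, hV⟩ := ih hnd.2 htail
      exact ⟨by rw [hU], hV⟩

lemma rot_next {f n i : Int} {U V : List Int} (h0 : 0 ≤ f) (hfn : f ≤ n)
    (hsplit : rotFrom f n = U ++ i :: V) : rotFrom (i+1) n = (V ++ U) ++ [i] := by
  have hi : 0 ≤ i ∧ i < n := by
    rw [← mem_rotFrom h0 hfn, hsplit]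
    exact List.mem_append_right U (List.mem_cons_self ..)
  obtain ⟨hi0, hin⟩ := hi
  have hnd : (rotFrom f n).Nodup := nodup_rotFrom h0
  by_cases hfi : f ≤ i
  · have hcanon : rotFrom f n = PySem.List.pyRange f i ++ i ::
        (PySem.List.pyRange (i+1) n ++ PySem.List.pyRange 0 f) := by
      unfold rotFrom
      rw [PySem.List.pyRange_one_append f i n hfi (le_of_lt hin),
          PySem.List.pyRange_one_cons hin]
      simp [List.append_assoc]
    obtain ⟨hU, hV⟩ := split_unique (hcanon ▸ hnd) (hcanon.symm.trans hsplit)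
    rw [← hU, ← hV]
    unfold rotFrom
    rw [show i + 1 = i + 1 from rfl, PySem.List.pyRange_one_succ_right hi0,
        PySem.List.pyRange_one_append 0 f i h0 hfi]
    simp [List.append_assoc]
  · rw [not_le] at hfi
    have hcanon : rotFrom f n = (PySem.List.pyRange f n ++ PySem.List.pyRange 0 i) ++ i ::
        PySem.List.pyRange (i+1) f := by
      unfold rotFrom
      rw [PySem.List.pyRange_one_append 0 i f hi0 (le_of_lt hfi),
          PySem.List.pyRange_one_cons hfi]
      simp [List.append_assoc]
    obtain ⟨hU, hV⟩ := split_unique (hcanon ▸ hnd) (hcanon.symm.trans hsplit)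
    rw [← hU, ← hV]
    unfold rotFrom
    rw [PySem.List.pyRange_one_succ_right hi0,
        PySem.List.pyRange_one_append (i+1) f n (by omega) hfn]
    simp [List.append_assoc]

lemma rot_remove {f n i : Int} {U V : List Int} (p : Int → Bool) (h0 : 0 ≤ f) (hfn : f ≤ n)
    (hsplit : rotFrom f n = U ++ i :: V) :
    (rotFrom (i+1) n).filter (fun x => p x && !(x == i)) = V.filter p ++ U.filter p := by
  have hnd : (U ++ i :: V).Nodup := hsplit ▸ nodup_rotFrom h0
  have hiU : i ∉ U := fun h => (List.disjoint_of_nodup_append hnd) h (List.mem_cons_self ..)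
  have hiV : i ∉ V := by
    have h' := hnd.of_append_right
    rw [List.nodup_cons] at h'
    exact h'.1
  have hcongr : ∀ (W : List Int), i ∉ W →
      W.filter (fun x => p x && !(x == i)) = W.filter p := by
    intro W hiW
    refine List.filter_congr (fun x hx => ?_)
    have hne : (x == i) = false := beq_eq_false_iff_ne.mpr (fun h => hiW (h ▸ hx))
    rw [hne]
    simp
  rw [rot_next h0 hfn hsplit, List.filter_append, List.filter_append,
      hcongr V hiV, hcongr U hiU]
  simp

-- one priority level: the G loop prints exactly the documents of priority v,
-- in circular order from f, then stands at the position after the last one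
lemma level (pr : List Int) (loc n v : Int) : ∀ (seq : List Int) (ps : Int → Bool) (f c : Int),
    0 ≤ f → f ≤ n →
    (rotFrom f n).filter (fun i => ps i && (gval pr i == v)) = seq →
    (∀ i, 0 ≤ i → i < n → ps i = true → gval pr i ≤ v) →
    G pr ((rotFrom f n).filter ps) c loc =
      (match bEmit seq c loc with
       | Sum.inl r => r
       | Sum.inr c' =>
          G pr ((rotFrom (if seq.isEmpty then f else seq.getLastD 0 + 1) n).filter
            (fun i => ps i && !(gval pr i == v))) c' loc) := by
  intro seq
  induction seq with
  | nil =>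
    intro ps f c h0 hfn hseq hbound
    simp only [bEmit, List.isEmpty_nil, if_true]
    have hcong : (rotFrom f n).filter (fun i => ps i && !(gval pr i == v))
        = (rotFrom f n).filter ps := by
      refine List.filter_congr (fun x hx => ?_)
      have hfail := List.filter_eq_nil_iff.mp hseq x hx
      cases hps : ps x
      · simp
      · have hgv : (gval pr x == v) = false := by
          cases hgv : (gval pr x == v)
          · rfl
          · exact absurd (by rw [hps, hgv]; rfl) hfail
        rw [hgv]
        simp
    rw [hcong]
  | cons i rest ih =>
    intro ps f c h0 hfn hseq hbound
    obtain ⟨U, V, hUV, hUfail, hpi, hVrest⟩ := List.filter_eq_cons_iff.mp hseq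
    have hpsi : ps i = true := by
      have := hpi
      simp only [Bool.and_eq_true] at this
      exact this.1
    have hgvi : gval pr i = v := by
      have := hpi
      simp only [Bool.and_eq_true, beq_iff_eq] at this
      exact this.2
    have hiRot : i ∈ rotFrom f n := by
      rw [hUV]
      exact List.mem_append_right U (List.mem_cons_self ..)
    obtain ⟨hi0, hin⟩ := (mem_rotFrom h0 hfn).mp hiRot
    have hl : (rotFrom f n).filter ps = U.filter ps ++ i :: V.filter ps := by
      rw [hUV, List.filter_append, List.filter_cons, hpsi]
      simp
    set X := U.filter ps with hX
    set Y := V.filter ps with hY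
    -- facts about the elements
    have hXfact : ∀ x ∈ X, x ∈ rotFrom f n ∧ ps x = true ∧ gval pr x < v := by
      intro x hx
      have hxU : x ∈ U := List.mem_of_mem_filter hx
      have hpsx : ps x = true := List.of_mem_filter hx
      have hxr : x ∈ rotFrom f n := by
        rw [hUV]; exact List.mem_append_left _ hxU
      obtain ⟨hx0, hxn⟩ := (mem_rotFrom h0 hfn).mp hxr
      have hle : gval pr x ≤ v := hbound x hx0 hxn hpsx
      have hne : gval pr x ≠ v := by
        intro he
        exact hUfail x hxU (by rw [hpsx, he]; simp)
      exact ⟨hxr, hpsx, lt_of_le_of_ne hle hne⟩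
    have hmem : ∀ x ∈ X ++ i :: Y, gval pr x ≤ v := by
      intro x hx
      rcases List.mem_append.mp hx with hx' | hx'
      · exact (hXfact x hx').2.2.le
      · rcases List.mem_cons.mp hx' with rfl | hx''
        · exact hgvi.le
        · have hxV : x ∈ V := List.mem_of_mem_filter hx''
          have hpsx : ps x = true := List.of_mem_filter hx''
          have hxr : x ∈ rotFrom f n := by
            rw [hUV]
            exact List.mem_append_right _ (List.mem_cons_of_mem _ hxV)
          obtain ⟨hx0, hxn⟩ := (mem_rotFrom h0 hfn).mp hxr
          exact hbound x hx0 hxn hpsx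
    rw [hl]
    have hne : X ++ i :: Y ≠ [] := by simp
    rw [G, dif_neg hne]
    simp only []
    -- the first maximal element sits exactly at position X.length
    have hfind : (X ++ i :: Y).findIdx
        (fun i' => (X ++ i :: Y).all (fun y => decide (gval pr y ≤ gval pr i'))) = X.length := by
      have hXall : X.findIdx
          (fun i' => (X ++ i :: Y).all (fun y => decide (gval pr y ≤ gval pr i'))) = X.length := by
        refine List.findIdx_eq_length.mpr (fun x hx => ?_)
        refine List.all_eq_false.mpr ⟨i, List.mem_append_right _ (List.mem_cons_self ..), ?_⟩
        simp only [decide_eq_true_eq, hgvi]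
        have := (hXfact x hx).2.2
        omega
      rw [List.findIdx_append, hXall, if_neg (lt_irrefl _), List.findIdx_cons]
      have hptrue : (X ++ i :: Y).all (fun y => decide (gval pr y ≤ gval pr i)) = true := by
        simp only [List.all_eq_true, decide_eq_true_eq, hgvi]
        exact hmem
      rw [hptrue]
      simp
    simp only [hfind]
    have hlen : X.length < (X ++ i :: Y).length := by simp
    have hget : (X ++ i :: Y)[X.length]'hlen = i := by
      rw [List.getElem_append_right (le_refl X.length)]
      simp
    simp only [hget]
    simp only [bEmit]
    by_cases hiloc : i = loc
    · rw [if_pos hiloc, if_pos hiloc]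
    · rw [if_neg hiloc, if_neg hiloc]
      have hdrop : (X ++ i :: Y).drop (X.length + 1) = Y := by
        have h1 : X ++ i :: Y = (X ++ [i]) ++ Y := by simp
        have h2 : X.length + 1 = (X ++ [i]).length := by simp
        rw [h1, h2, List.drop_left]
      have htake : (X ++ i :: Y).take X.length = X := List.take_left
      rw [hdrop, htake]
      have hYX : Y ++ X = (rotFrom (i+1) n).filter (fun x => ps x && !(x == i)) := by
        rw [hX, hY]
        exact (rot_remove ps h0 hfn hUV).symm
      rw [hYX]
      have hseq' : (rotFrom (i+1) n).filter
          (fun x => (ps x && !(x == i)) && (gval pr x == v)) = rest := by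
        have hr := rot_remove (fun j => ps j && (gval pr j == v)) h0 hfn hUV
        have hUnil : U.filter (fun j => ps j && (gval pr j == v)) = [] :=
          List.filter_eq_nil_iff.mpr hUfail
        have hpredeq : (fun x => (ps x && !(x == i)) && (gval pr x == v))
            = (fun x => (ps x && (gval pr x == v)) && !(x == i)) := by
          funext x
          cases ps x <;> cases (x == i) <;> cases (gval pr x == v) <;> rfl
        rw [hpredeq, hr, hVrest, hUnil, List.append_nil]
      have hbound' : ∀ x, 0 ≤ x → x < n → (ps x && !(x == i)) = true → gval pr x ≤ v := by
        intro x hx0 hxn hx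
        simp only [Bool.and_eq_true] at hx
        exact hbound x hx0 hxn hx.1
      have hih := ih (fun x => ps x && !(x == i)) (i+1) (c+1) (by omega) (by omega) hseq' hbound'
      rw [hih]
      -- align the two fall-through states
      have hstart : (if rest.isEmpty = true then i + 1 else rest.getLastD 0 + 1)
          = (i :: rest).getLastD 0 + 1 := by
        cases rest with
        | nil => simp
        | cons b t => simp
      have hfilters : (rotFrom (if rest.isEmpty = true then i + 1 else rest.getLastD 0 + 1) n).filter
            (fun x => (ps x && !(x == i)) && !(gval pr x == v))
          = (rotFrom (if (i :: rest).isEmpty = true then f else (i :: rest).getLastD 0 + 1) n).filter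
            (fun x => ps x && !(gval pr x == v)) := by
        rw [hstart]
        simp only [List.isEmpty_cons, Bool.false_eq_true, if_false]
        refine List.filter_congr (fun x _ => ?_)
        by_cases hxi : x = i
        · subst hxi
          rw [hgvi]
          simp
        · have hb : (x == i) = false := beq_eq_false_iff_ne.mpr hxi
          rw [hb]
          simp
      cases hbe : bEmit rest (c + 1) loc with
      | inl r => rfl
      | inr c' =>
        simp only []
        rw [hfilters]


-- all priority levels: G equals B's level loop
lemma outer (pr : List Int) (loc n : Int) (hn : n = (pr.length : Int))
    (groups : PySem.Dict Int (List Int))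
    (hg : ∀ v, groups.getD v [] = (PySem.List.pyRange 0 n).filter (fun i => gval pr i == v)) :
    ∀ (vs : List Int) (cur c : Int), 0 ≤ cur → cur ≤ n →
    vs.Pairwise (fun a b => b < a) →
    (∀ v ∈ vs, ∃ i : Int, 0 ≤ i ∧ i < n ∧ gval pr i = v) →
    G pr ((rotFrom cur n).filter (fun i => decide (gval pr i ∈ vs))) c loc
      = bLevels groups vs c cur loc n := by
  intro vs
  induction vs with
  | nil =>
    intro cur c h0 hcn hpw hne
    have hnilf : (rotFrom cur n).filter (fun i => decide (gval pr i ∈ ([] : List Int))) = [] := by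
      simp
    rw [hnilf, G]
    simp [bLevels]
  | cons v rest ihv =>
    intro cur c h0 hcn hpw hne
    have hsplitR : PySem.List.pyRange 0 n = PySem.List.pyRange 0 cur ++ PySem.List.pyRange cur n :=
      PySem.List.pyRange_one_append 0 cur n h0 hcn
    set pv : Int → Bool := fun i => (gval pr i == v) with hpv
    set A1 := (PySem.List.pyRange 0 cur).filter pv with hA1
    set A2 := (PySem.List.pyRange cur n).filter pv with hA2
    have hidxs2 : groups.getD v [] = A1 ++ A2 := by
      rw [hg v, hsplitR, List.filter_append]
    have hrotf : (rotFrom cur n).filter pv = A2 ++ A1 := by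
      unfold rotFrom
      rw [List.filter_append]
    have hsorted : (A1 ++ A2).Pairwise (fun a b => a ≤ b) := by
      have h' : A1 ++ A2 = (PySem.List.pyRange 0 n).filter pv := by
        rw [hsplitR, List.filter_append]
      rw [h']
      exact ((PySem.List.pairwise_lt_pyRange_one 0 n).filter pv).imp (fun h => h.le)
    have hA1lt : ∀ x ∈ A1, x < cur :=
      fun x hx => ((PySem.List.mem_pyRange_one).mp (List.mem_of_mem_filter hx)).2
    have hA2ge : ∀ x ∈ A2, cur ≤ x :=
      fun x hx => ((PySem.List.mem_pyRange_one).mp (List.mem_of_mem_filter hx)).1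
    have hkA1 : PySem.List.bisectLeft (A1 ++ A2) cur = A1.length := by
      obtain ⟨hk1, hk2, hk3⟩ := PySem.List.bisectLeft_spec (A1 ++ A2) cur hsorted
      have hdl : (A1 ++ A2).length = A1.length + A2.length := List.length_append
      by_contra hne'
      rcases Nat.lt_or_ge (PySem.List.bisectLeft (A1 ++ A2) cur) A1.length with hlt | hge
      · have hklen : PySem.List.bisectLeft (A1 ++ A2) cur < (A1 ++ A2).length := by omega
        have hcur := hk3 _ hklen (le_refl _)
        have hmem : (A1 ++ A2)[PySem.List.bisectLeft (A1 ++ A2) cur]'hklen ∈ A1 := by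
          rw [List.getElem_append_left hlt]
          exact List.getElem_mem _
        have := hA1lt _ hmem
        omega
      · have hgt : A1.length < PySem.List.bisectLeft (A1 ++ A2) cur :=
          lt_of_le_of_ne hge (Ne.symm hne')
        have hlen2 : A1.length < (A1 ++ A2).length := by omega
        have hlt2 := hk2 A1.length hlen2 hgt
        have hmemA2 : (A1 ++ A2)[A1.length]'hlen2 ∈ A2 := by
          rw [List.getElem_append_right (le_refl _)]
          exact List.getElem_mem _
        have := hA2ge _ hmemA2
        omega
    rw [bLevels]
    rw [hidxs2, hkA1, List.drop_left, List.take_left]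
    have hmemv : ∀ x : Int, ((decide (gval pr x ∈ v :: rest)) && pv x) = pv x := by
      intro x
      cases hpvx : pv x
      · simp
      · have : gval pr x = v := by
          have := hpvx
          rw [hpv] at this
          exact beq_iff_eq.mp this
        simp [this]
    have hseqlvl : (rotFrom cur n).filter
        (fun i => (decide (gval pr i ∈ v :: rest)) && (gval pr i == v)) = A2 ++ A1 := by
      rw [List.filter_congr (fun x _ => hmemv x), hrotf]
    have hboundlvl : ∀ i : Int, 0 ≤ i → i < n →
        decide (gval pr i ∈ v :: rest) = true → gval pr i ≤ v := by
      intro x hx0 hxn hmemx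
      simp only [decide_eq_true_eq, List.mem_cons] at hmemx
      rcases hmemx with he | hm
      · exact he.le
      · exact ((List.pairwise_cons.mp hpw).1 _ hm).le
    have hlvl := level pr loc n v (A2 ++ A1) (fun i => decide (gval pr i ∈ v :: rest))
      cur c h0 hcn hseqlvl hboundlvl
    rw [hlvl]
    cases hbe : bEmit (A2 ++ A1) c loc with
    | inl r => rfl
    | inr c' =>
      simp only []
      obtain ⟨i0, hi00, hi0n, hgv0⟩ := hne v (List.mem_cons_self ..)
      have hseqne : A2 ++ A1 ≠ [] := by
        intro hnil
        have hi0mem : i0 ∈ (rotFrom cur n).filter pv := by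
          rw [List.mem_filter, mem_rotFrom h0 hcn]
          refine ⟨⟨hi00, hi0n⟩, ?_⟩
          rw [hpv]
          simp [hgv0]
        rw [hrotf, hnil] at hi0mem
        exact absurd hi0mem (List.not_mem_nil)
      have hLmem : (A2 ++ A1).getLastD 0 ∈ A2 ++ A1 := getLastD_mem_of_ne_nil 0 hseqne
      have hLrot : (A2 ++ A1).getLastD 0 ∈ rotFrom cur n := by
        refine List.mem_of_mem_filter (p := pv) ?_
        rw [hrotf]
        exact hLmem
      obtain ⟨hL0, hLn⟩ := (mem_rotFrom h0 hcn).mp hLrot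
      have hnpos : (0:Int) < n := by omega
      have hseqE : (A2 ++ A1).isEmpty = false := by
        rw [List.isEmpty_eq_false_iff]
        exact hseqne
      rw [hseqE]
      simp only [Bool.false_eq_true, if_false]
      have hpredr : ∀ x ∈ rotFrom ((A2 ++ A1).getLastD 0 + 1) n,
          ((decide (gval pr x ∈ v :: rest)) && !(gval pr x == v)) = decide (gval pr x ∈ rest) := by
        intro x _
        by_cases hxv : gval pr x = v
        · have hvnr : v ∉ rest :=
            fun hmm => absurd ((List.pairwise_cons.mp hpw).1 v hmm) (lt_irrefl v)
          simp [hxv, hvnr]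
        · have h1 : (gval pr x == v) = false := beq_eq_false_iff_ne.mpr hxv
          rw [h1]
          simp [List.mem_cons, hxv]
      rw [List.filter_congr hpredr]
      have hpwr : rest.Pairwise (fun a b => b < a) := (List.pairwise_cons.mp hpw).2
      have hner : ∀ v' ∈ rest, ∃ i : Int, 0 ≤ i ∧ i < n ∧ gval pr i = v' :=
        fun v' hv' => hne v' (List.mem_cons_of_mem _ hv')
      by_cases hLn1 : (A2 ++ A1).getLastD 0 + 1 = n
      · have hmodv : PySem.Int.mod ((A2 ++ A1).getLastD 0 + 1) n = 0 := by
          rw [PySem.Int.mod_eq_emod_of_pos hnpos, hLn1, Int.emod_self]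
        have hrot0 : rotFrom ((A2 ++ A1).getLastD 0 + 1) n = rotFrom 0 n := by
          rw [hLn1]
          unfold rotFrom
          rw [PySem.List.pyRange_one_eq_nil (le_refl n),
              PySem.List.pyRange_one_eq_nil (le_refl 0)]
          simp
        rw [hrot0, hmodv]
        exact ihv 0 c' (le_refl 0) (by omega) hpwr hner
      · have hmodv : PySem.Int.mod ((A2 ++ A1).getLastD 0 + 1) n
            = (A2 ++ A1).getLastD 0 + 1 := by
          rw [PySem.Int.mod_eq_emod_of_pos hnpos, Int.emod_eq_of_lt (by omega) (by omega)]
        rw [hmodv]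
        exact ihv ((A2 ++ A1).getLastD 0 + 1) c' (by omega) (by omega) hpwr hner

lemma groups_getD (pr : List Int) (v : Int) :
    ((PySem.List.enumerate pr).foldl
      (fun d q => d.modify q.2 [] (fun t => t ++ [q.1])) PySem.Dict.empty).getD v []
    = (PySem.List.pyRange 0 (pr.length : Int)).filter (fun i => gval pr i == v) := by
  have h1 : (PySem.List.enumerate pr).foldl
        (fun (d : PySem.Dict Int (List Int)) q => d.modify q.2 [] fun t => t ++ [q.1])
        PySem.Dict.empty
      = ((PySem.List.enumerate pr).map Prod.swap).foldl
        (fun (d : PySem.Dict Int (List Int)) p => d.modify p.1 [] fun t => t ++ [p.2])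
        PySem.Dict.empty :=
    (List.foldl_map (f := Prod.swap)
      (g := fun (d : PySem.Dict Int (List Int)) p => d.modify p.1 [] fun t => t ++ [p.2])
      (l := PySem.List.enumerate pr) (init := PySem.Dict.empty)).symm
  rw [h1, PySem.Dict.getD_foldl_modify_append]
  rw [PySem.List.enumerate_eq_map_pyRange pr 0, List.map_map, List.filter_map, List.map_map]
  simp [Function.comp_def, gval, PySem.List.len_eq]

lemma groups_keys (pr : List Int) :
    ((PySem.List.enumerate pr).foldl
      (fun d q => d.modify q.2 [] (fun t => t ++ [q.1])) PySem.Dict.empty).keys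
    = PySem.Set.ofList pr := by
  refine Eq.trans (PySem.Dict.keys_foldl_modify_key (PySem.List.enumerate pr)
    (fun q => q.2) [] (fun _ q t => t ++ [q.1]) PySem.Dict.empty) ?_
  rw [PySem.List.map_snd_enumerate pr 0]
  rfl

-- ===== VERDICT (by name: the statement is the Claim_ definition above) =====
lemma gval_mem {pr : List Int} {x n : Int} (hn : n = (pr.length : Int))
    (hx0 : 0 ≤ x) (hxn : x < n) : gval pr x ∈ pr := by
  have hx : x = ((x.toNat : Nat) : Int) := by omega
  rw [gval, hx, PySem.List.pyGetD_natCast]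
  have hlt : x.toNat < pr.length := by omega
  rw [List.getD_eq_getElem pr 0 hlt]
  exact List.getElem_mem hlt

theorem solution_spec : Claim_equal_solution := by
  intro priorities location _dom
  unfold Spec_solution
  have hn0 : (0 : Int) ≤ (priorities.length : Int) := Int.natCast_nonneg _
  -- name the dictionary and the sorted key list of B
  set groups : PySem.Dict Int (List Int) :=
    (PySem.List.enumerate priorities).foldl
      (fun d q => d.modify q.2 [] (fun t => t ++ [q.1])) PySem.Dict.empty with hgroups
  set vs := PySem.List.sorted groups.keys (fun v => v) true with hvs
  have hkeys : groups.keys = PySem.Set.ofList priorities := groups_keys priorities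
  have hgd : ∀ v, groups.getD v []
      = (PySem.List.pyRange 0 (priorities.length : Int)).filter (fun i => gval priorities i == v) :=
    fun v => groups_getD priorities v
  -- order facts about vs
  have hperm : vs.Perm groups.keys := PySem.List.sorted_perm groups.keys (fun v => v) true
  have hnodupk : groups.keys.Nodup := by
    rw [hkeys]
    exact PySem.Set.nodup_ofList priorities
  have hnd : vs.Nodup := hperm.symm.nodup hnodupk
  have hge : vs.Pairwise (fun a b => b ≤ a) := PySem.List.sorted_pairwise_rev groups.keys (fun v => v)
  have hpw : vs.Pairwise (fun a b => b < a) := by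
    have hand := hge.and hnd
    exact hand.imp (fun h => lt_of_le_of_ne h.1 (fun he => h.2 he.symm))
  have hex : ∀ v ∈ vs, ∃ i : Int, 0 ≤ i ∧ i < (priorities.length : Int) ∧ gval priorities i = v := by
    intro v hv
    have hvk : v ∈ groups.keys := (PySem.List.mem_sorted groups.keys (fun v => v) true v).mp hv
    rw [hkeys] at hvk
    have hvpr : v ∈ priorities := (PySem.Set.mem_ofList priorities v).mp hvk
    obtain ⟨k, hk, hkv⟩ := List.mem_iff_getElem.mp hvpr
    refine ⟨(k : Int), Int.natCast_nonneg k, by exact_mod_cast hk, ?_⟩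
    rw [gval, PySem.List.pyGetD_natCast, List.getD_eq_getElem priorities 0 hk, hkv]
  -- the initial queue is the whole circular range
  have hfull : (rotFrom 0 (priorities.length : Int)).filter
      (fun i => decide (gval priorities i ∈ vs)) = PySem.List.pyRange 0 (priorities.length : Int) := by
    have hrot0 : rotFrom 0 (priorities.length : Int) = PySem.List.pyRange 0 (priorities.length : Int) := by
      unfold rotFrom
      rw [PySem.List.pyRange_one_eq_nil (le_refl (0:Int))]
      simp
    rw [hrot0]
    refine List.filter_eq_self.mpr (fun x hx => ?_)
    obtain ⟨hx0, hxn⟩ := PySem.List.mem_pyRange_one.mp hx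
    have hmem : gval priorities x ∈ priorities := gval_mem rfl hx0 hxn
    have : gval priorities x ∈ vs := by
      rw [hvs, PySem.List.mem_sorted, hkeys, PySem.Set.mem_ofList]
      exact hmem
    simpa using this
  -- A's loop equals the jump loop equals G
  have h1 : solution priorities location
      = G priorities (PySem.List.pyRange 0 (priorities.length : Int)) 0 location := by
    unfold solution
    rw [PySem.List.enumerate_eq_map_pyRange priorities 0, PySem.List.len_eq]
    have hfn : (fun j : Int => (j, PySem.List.pyGetD priorities j 0))
        = (fun i : Int => (i, gval priorities i)) := rfl
    rw [hfn]
    rw [aloop_eq_Fq location (((PySem.List.pyRange 0 (priorities.length : Int)).map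
          (fun i => (i, gval priorities i))).length) _ 0 (le_refl _)]
    exact Fq_map priorities location (PySem.List.pyRange 0 (priorities.length : Int)).length _ 0 (le_refl _)
  rw [h1, ← hfull,
      outer priorities location (priorities.length : Int) rfl groups hgd vs 0 0 (le_refl 0) hn0 hpw hex]
  rfl
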